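-- pv_equiv track=rewrite | github.com/pypi-data/pypi-mirror-383 | packages/acat/acat-2.0.1.tar.gz/acat-2.0.1/acat/utilities.py | numbers_from_ratios
-- ===== SOURCE A (Python) =====
-- def numbers_from_ratios(sum_numbers, ratios):
--     """Return the number of atoms for each element from ratios.
--
--     Parameters
--     ----------
--     sum_numbers : int
--         The total number of atoms
--
--     ratios : list
--         A list of ratios for different elements
--     """
--
--     sum_ratios = sum(ratios)
--     totals = [int((sum_numbers * r) // sum_ratios) for r in ratios]
--     residues = [(sum_numbers * r) % sum_ratios for r in ratios]
--     for i in sorted(range(len(ratios)), key=lambda i: residues[i]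
--     * ratios[i], reverse=True)[:sum_numbers-sum(totals)]:
--         totals[i] += 1
--
--     return totals
-- ===== SOURCE B (Python) =====
-- def numbers_from_ratios(sum_numbers, ratios):
--     """Largest-remainder apportionment by rank counting: index i receives one of
--     the k leftover units iff fewer than k indices have a strictly larger
--     tie-broken priority key (residue*ratio, ties to the lower index)."""
--     sum_ratios = sum(ratios)
--     n = len(ratios)
--     keys = [((sum_numbers * r) % sum_ratios) * r * n - i for i, r in enumerate(ratios)]
--     base = [(sum_numbers * r) // sum_ratios for r in ratios]
--     k = sum_numbers - sum(base)
--     return [b + (1 if sum(1 for kj in keys if kj > ki) < k else 0)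
--             for b, ki in zip(base, keys)]
-- ===== Notes on version B (the rewrite author's own statement) =====
-- stated objective: alternative
-- what changed: Replaces the stable sort of indices, the slice of the top k and the in-place increment loop by a closed-form rank count: each index gets one leftover unit iff fewer than k indices have a strictly larger tie-broken priority key (residue*ratio scaled by n minus the index), so no sort, no permutation and no mutation are performed.
-- outside the precondition, e.g. on numbers_from_ratios(7, [2, -2]): A raises ZeroDivisionError, B raises ZeroDivisionError; on numbers_from_ratios(3, [1, 2, -3]): A raises ZeroDivisionError, B raises ZeroDivisionError
import Mathlib
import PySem

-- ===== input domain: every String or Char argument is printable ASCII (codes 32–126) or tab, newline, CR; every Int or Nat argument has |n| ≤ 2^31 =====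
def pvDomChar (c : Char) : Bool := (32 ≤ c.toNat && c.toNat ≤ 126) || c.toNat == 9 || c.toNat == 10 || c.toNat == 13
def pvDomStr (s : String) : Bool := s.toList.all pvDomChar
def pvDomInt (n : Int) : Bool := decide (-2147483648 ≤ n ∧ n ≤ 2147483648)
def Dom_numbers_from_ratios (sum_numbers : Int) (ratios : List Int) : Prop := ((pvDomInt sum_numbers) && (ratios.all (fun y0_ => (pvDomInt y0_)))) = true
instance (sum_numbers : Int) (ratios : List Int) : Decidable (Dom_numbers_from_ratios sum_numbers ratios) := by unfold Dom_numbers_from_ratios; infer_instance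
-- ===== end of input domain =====

-- B replaces A's stable sort + top-k slice + in-place increment loop by a
-- closed-form rank count per index (alternative decomposition, not claimed faster).

-- ===== PORT A =====
def numbers_from_ratios (sum_numbers : Int) (ratios : List Int) : List Int :=
  let sum_ratios := ratios.sum
  let totals := ratios.map (fun r => PySem.Int.floordiv (sum_numbers * r) sum_ratios)
  let residues := ratios.map (fun r => PySem.Int.mod (sum_numbers * r) sum_ratios)
  (PySem.List.slice
      (PySem.List.sorted (PySem.List.pyRange 0 (ratios.length : Int) 1)
        (fun i => PySem.List.pyGetD residues i 0 * PySem.List.pyGetD ratios i 0) true)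
      none (some (sum_numbers - totals.sum))).foldl
    (fun t i => PySem.List.pySetD t i (PySem.List.pyGetD t i 0 + 1)) totals

-- ===== PORT B =====
def numbers_from_ratios_alt (sum_numbers : Int) (ratios : List Int) : List Int :=
  let sum_ratios := ratios.sum
  let n := (ratios.length : Int)
  let keys := (PySem.List.enumerate ratios).map
      (fun p => PySem.Int.mod (sum_numbers * p.2) sum_ratios * p.2 * n - p.1)
  let base := ratios.map (fun r => PySem.Int.floordiv (sum_numbers * r) sum_ratios)
  let k := sum_numbers - base.sum
  (base.zip keys).map (fun p =>
    p.1 + (if ((keys.countP (fun kj => p.2 < kj) : Nat) : Int) < k then 1 else 0))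

-- ===== PRECONDITION & SPEC =====
-- Pre_ excludes exactly the nonempty ratio lists with sum(ratios) == 0, on
-- which Python A raises ZeroDivisionError.
def Pre_numbers_from_ratios (sum_numbers : Int) (ratios : List Int) : Prop :=
  ratios = [] ∨ ratios.sum ≠ 0
instance (sum_numbers : Int) (ratios : List Int) : Decidable (Pre_numbers_from_ratios sum_numbers ratios) := by unfold Pre_numbers_from_ratios; infer_instance

def pvWitness_numbers_from_ratios : Int × List Int := (10, [2, 3, 4])

def Spec_numbers_from_ratios (sum_numbers : Int) (ratios : List Int) (out : List Int) : Prop := out = numbers_from_ratios_alt sum_numbers ratios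
instance (sum_numbers : Int) (ratios : List Int) (out : List Int) : Decidable (Spec_numbers_from_ratios sum_numbers ratios out) := by unfold Spec_numbers_from_ratios; infer_instance

-- ===== CLAIM (what is proved, stated in full; the proofs are below) =====
def Claim_equal_numbers_from_ratios : Prop := ∀ (sum_numbers : Int) (ratios : List Int), Dom_numbers_from_ratios sum_numbers ratios → Pre_numbers_from_ratios sum_numbers ratios → Spec_numbers_from_ratios sum_numbers ratios (numbers_from_ratios sum_numbers ratios)

-- ===== LEMMAS AND PROOFS =====

-- insertBy only looks at comparisons of the new element against list members
theorem pv_insertBy_congr (b1 b2 : Int → Int → Bool) (x : Int) :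
    ∀ (ys : List Int), (∀ y ∈ ys, b1 x y = b2 x y) →
    PySem.List.insertBy b1 x ys = PySem.List.insertBy b2 x ys := by
  intro ys
  induction ys with
  | nil => intro _; rfl
  | cons y ys ih =>
    intro h
    simp only [PySem.List.insertBy]
    rw [h y (by simp)]
    by_cases hb : b2 x y = true
    · simp [hb]
    · simp only [Bool.not_eq_true] at hb
      simp [hb, ih (fun z hz => h z (by simp [hz]))]

-- folding insertBy is unchanged when the comparisons agree on all pairs that occur
theorem pv_foldl_insertBy_congr (R : Int → Int → Prop) (b1 b2 : Int → Int → Bool)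
    (hR : ∀ x y : Int, R y x → b1 x y = b2 x y) :
    ∀ (xs acc : List Int), List.Pairwise R xs → (∀ x ∈ xs, ∀ y ∈ acc, R y x) →
    xs.foldl (fun a x => PySem.List.insertBy b1 x a) acc =
      xs.foldl (fun a x => PySem.List.insertBy b2 x a) acc := by
  intro xs
  induction xs with
  | nil => intro acc _ _; rfl
  | cons x xs ih =>
    intro acc hpw hacc
    simp only [List.foldl_cons]
    rw [pv_insertBy_congr b1 b2 x acc (fun y hy => hR x y (hacc x (by simp) y hy))]
    apply ih _ (List.Pairwise.of_cons hpw)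
    intro x' hx' y hy
    rcases (PySem.List.mem_insertBy _ _ _ _).mp hy with rfl | hy'
    · exact (List.pairwise_cons.mp hpw).1 x' hx'
    · exact hacc x' (by simp [hx']) y hy'

-- refining the key by the index does not change the stable descending sort of range(N)
theorem pv_sorted_refine (key : Int → Int) (N : Int) :
    PySem.List.sorted (PySem.List.pyRange 0 N 1) key true =
      PySem.List.sorted (PySem.List.pyRange 0 N 1) (fun i => key i * N - i) true := by
  rw [PySem.List.sorted_rev_eq_foldl_insertBy, PySem.List.sorted_rev_eq_foldl_insertBy]
  apply pv_foldl_insertBy_congr (fun y x => 0 ≤ y ∧ y < x ∧ x < N)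
  · intro x y ⟨hy0, hyx, hxN⟩
    by_cases h : key y < key x
    · simp only [h, decide_eq_true]
      rw [eq_comm, decide_eq_true_eq]
      nlinarith
    · push_neg at h
      rw [decide_eq_false, decide_eq_false]
      · simp only [not_lt]; nlinarith
      · simp only [not_lt]; omega
  · have hpw := PySem.List.pairwise_lt_pyRange_one (a := 0) (b := N)
    rw [List.pairwise_iff_getElem] at hpw ⊢
    intro p q hp hq hpq
    have h1 := hpw p q hp hq hpq
    have h2 : (PySem.List.pyRange 0 N 1)[p] ∈ PySem.List.pyRange 0 N 1 := List.getElem_mem _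
    have h3 : (PySem.List.pyRange 0 N 1)[q] ∈ PySem.List.pyRange 0 N 1 := List.getElem_mem _
    rw [PySem.List.mem_pyRange_one] at h2 h3
    exact ⟨h2.1, h1, h3.2⟩
  · intro x hx y hy
    simp at hy

-- the refined sort is strictly decreasing in the refined key
theorem pv_sorted_strict (key : Int → Int) (N : Int) :
    (PySem.List.sorted (PySem.List.pyRange 0 N 1) (fun i => key i * N - i) true).Pairwise
      (fun a b => key b * N - b < key a * N - a) := by
  have hle := PySem.List.sorted_pairwise_rev (PySem.List.pyRange 0 N 1)
    (fun i => key i * N - i)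
  have hperm := PySem.List.sorted_perm (PySem.List.pyRange 0 N 1)
    (fun i => key i * N - i) true
  have hnd : (PySem.List.sorted (PySem.List.pyRange 0 N 1) (fun i => key i * N - i) true).Nodup :=
    hperm.nodup_iff.mpr (PySem.List.nodup_pyRange_one 0 N)
  have hmem : ∀ x ∈ PySem.List.sorted (PySem.List.pyRange 0 N 1) (fun i => key i * N - i) true,
      0 ≤ x ∧ x < N := by
    intro x hx
    have := hperm.mem_iff.mp hx
    rw [PySem.List.mem_pyRange_one] at this
    exact this
  rw [List.Nodup, List.pairwise_iff_getElem] at hnd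
  rw [List.pairwise_iff_getElem] at hle ⊢
  intro p q hp hq hpq
  have h1 := hle p q hp hq hpq
  have h2 := hnd p q hp hq hpq
  simp only at h1
  have ha := hmem _ (List.getElem_mem hp)
  have hb := hmem _ (List.getElem_mem hq)
  rcases lt_or_eq_of_le h1 with h | h
  · exact h
  · exfalso
    apply h2
    set a := (PySem.List.sorted (PySem.List.pyRange 0 N 1) (fun i => key i * N - i) true)[p]
    set b := (PySem.List.sorted (PySem.List.pyRange 0 N 1) (fun i => key i * N - i) true)[q]
    rcases lt_trichotomy (key a) (key b) with hk | hk | hk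
    · nlinarith [ha.1, ha.2, hb.1, hb.2]
    · rw [hk] at h; omega
    · nlinarith [ha.1, ha.2, hb.1, hb.2]

-- membership in the top-t of a strictly descending list = rank < t
theorem pv_mem_take_iff (key : Int → Int) :
    ∀ (S : List Int), S.Pairwise (fun a b => key b < key a) →
    ∀ i ∈ S, ∀ t : Nat, (i ∈ S.take t ↔ S.countP (fun j => decide (key i < key j)) < t) := by
  intro S
  induction S with
  | nil => intro _ i hi; simp at hi
  | cons a S ih =>
    intro hpw i hi t
    have hhead := (List.pairwise_cons.mp hpw).1
    have htl := (List.pairwise_cons.mp hpw).2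
    by_cases hia : i = a
    · subst hia
      have hcnt : (i :: S).countP (fun j => decide (key i < key j)) = 0 := by
        rw [List.countP_eq_zero]
        intro j hj
        rcases hj with _ | hj
        · simp
        · simp only [decide_eq_true_eq]
          exact not_lt.mpr (le_of_lt (hhead j (by assumption)))
      rw [hcnt]
      cases t with
      | zero => simp
      | succ t => simp [List.take_succ_cons]
    · have hiS : i ∈ S := (List.mem_cons.mp hi).resolve_left hia
      have hki : key i < key a := hhead i hiS
      have hcnt : (a :: S).countP (fun j => decide (key i < key j)) =
          S.countP (fun j => decide (key i < key j)) + 1 := by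
        rw [List.countP_cons]
        simp [hki]
      rw [hcnt]
      cases t with
      | zero => simp
      | succ t =>
        rw [List.take_succ_cons]
        constructor
        · intro hm
          rcases hm with _ | hm
          · exact absurd rfl hia
          · have := (ih htl i hiS t).mp (by assumption)
            omega
        · intro hlt
          have := (ih htl i hiS t).mpr (by omega)
          exact List.mem_cons_of_mem _ this

-- the increment loop, pointwise
theorem pv_foldl_inc :
    ∀ (sel ts : List Int), sel.Nodup → (∀ i ∈ sel, 0 ≤ i ∧ i < (ts.length : Int)) →
    (sel.foldl (fun t i => PySem.List.pySetD t i (PySem.List.pyGetD t i 0 + 1)) ts).length = ts.length ∧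
    ∀ m : Nat, m < ts.length →
      (sel.foldl (fun t i => PySem.List.pySetD t i (PySem.List.pyGetD t i 0 + 1)) ts).getD m 0 =
        ts.getD m 0 + (if ((m : Int) ∈ sel) then 1 else 0) := by
  intro sel
  induction sel with
  | nil => intro ts _ _; simp
  | cons x sel ih =>
    intro ts hnd hbnd
    obtain ⟨hx0, hxlen⟩ := hbnd x (by simp)
    have hxnat : x.toNat < ts.length := by omega
    have hset : PySem.List.pySetD ts x (PySem.List.pyGetD ts x 0 + 1) =
        ts.set x.toNat (PySem.List.pyGetD ts x 0 + 1) := PySem.List.pySetD_of_nonneg _ _ hx0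
    have hlen2 : (ts.set x.toNat (PySem.List.pyGetD ts x 0 + 1)).length = ts.length := by simp
    simp only [List.foldl_cons, hset]
    obtain ⟨hlen, hval⟩ := ih (ts.set x.toNat (PySem.List.pyGetD ts x 0 + 1))
      (List.Nodup.of_cons hnd)
      (by intro i hi; have := hbnd i (by simp [hi]); simpa [hlen2] using this)
    refine ⟨by rw [hlen, hlen2], ?_⟩
    intro m hm
    rw [hval m (by omega)]
    have hget : PySem.List.pyGetD ts x 0 = ts.getD x.toNat 0 :=
      PySem.List.pyGetD_of_nonneg _ _ hx0
    by_cases hmx : (m : Int) = x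
    · have hmx' : m = x.toNat := by omega
      have hnotin : (m : Int) ∉ sel := by rw [hmx]; exact (List.nodup_cons.mp hnd).1
      subst hmx'
      rw [List.getD_eq_getElem _ _ (by simpa [hlen2] using hm),
          List.getElem_set_self (by simpa using hxnat), hget,
          List.getD_eq_getElem _ _ hxnat]
      simp [hnotin, hmx, List.mem_cons]
      exact hmx ▸ hnotin
    · have hne : m ≠ x.toNat := by omega
      rw [List.getD_eq_getElem _ _ (by simpa [hlen2] using hm),
          List.getElem_set_ne (by omega), List.getD_eq_getElem _ _ hm]
      simp [List.mem_cons, hmx]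

-- Euclid-style identity summed over the list
theorem pv_sum_div_mod (s b : Int) :
    ∀ (l : List Int),
      (l.map (fun r => PySem.Int.floordiv (s * r) b)).sum * b +
        (l.map (fun r => PySem.Int.mod (s * r) b)).sum = s * l.sum := by
  intro l
  induction l with
  | nil => simp
  | cons r l ih =>
    simp only [List.map_cons, List.sum_cons]
    have h := PySem.Int.floordiv_mul_add_mod (s * r) b
    ring_nf
    ring_nf at ih h
    linarith

-- the number of leftover units is nonnegative
theorem pv_k_nonneg (s : Int) (ratios : List Int) (h : ratios.sum ≠ 0) :
    0 ≤ s - (ratios.map (fun r => PySem.Int.floordiv (s * r) ratios.sum)).sum := by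
  have hid := pv_sum_div_mod s ratios.sum ratios
  rcases lt_or_gt_of_ne h with hneg | hpos
  · have hM : (ratios.map (fun r => PySem.Int.mod (s * r) ratios.sum)).sum ≤ 0 := by
      have hgen : ∀ l : List Int, (∀ x ∈ l, x ≤ 0) → l.sum ≤ 0 := by
        intro l hl
        induction l with
        | nil => simp
        | cons a l ih =>
          simp only [List.sum_cons]
          have := hl a (by simp)
          have := ih (fun x hx => hl x (by simp [hx]))
          linarith
      apply hgen
      intro x hx
      obtain ⟨r, _, rfl⟩ := List.mem_map.mp hx
      exact (PySem.Int.mod_neg_bounds (s * r) hneg).2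
    nlinarith
  · have hM : 0 ≤ (ratios.map (fun r => PySem.Int.mod (s * r) ratios.sum)).sum := by
      apply List.sum_nonneg
      intro x hx
      obtain ⟨r, _, rfl⟩ := List.mem_map.mp hx
      exact PySem.Int.mod_nonneg (s * r) hpos
    nlinarith

-- ===== VERDICT (by name: the statement is the Claim_ definition above) =====
theorem numbers_from_ratios_spec : Claim_equal_numbers_from_ratios := by
  intro s ratios _ hpre
  unfold Pre_numbers_from_ratios at hpre
  rcases hpre with rfl | hpre
  · unfold Spec_numbers_from_ratios
    simp [numbers_from_ratios, numbers_from_ratios_alt, PySem.List.slice,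
      PySem.List.pyRange, PySem.List.sorted, PySem.List.enumerate]
  unfold Spec_numbers_from_ratios numbers_from_ratios numbers_from_ratios_alt
  simp only []
  set SS := ratios.sum with hSS
  set N : Int := (ratios.length : Int) with hN
  set base := List.map (fun r => PySem.Int.floordiv (s * r) SS) ratios with hbase
  set res := List.map (fun r => PySem.Int.mod (s * r) SS) ratios with hres
  set keyA : Int → Int := fun i => PySem.List.pyGetD res i 0 * PySem.List.pyGetD ratios i 0 with hkeyA
  set k := s - base.sum with hkdef
  have hk0 : 0 ≤ k := pv_k_nonneg s ratios hpre
  have hblen : base.length = ratios.length := by rw [hbase]; simp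
  have hrlen : res.length = ratios.length := by rw [hres]; simp
  rw [pv_sorted_refine keyA N]
  set key' : Int → Int := fun i => keyA i * N - i with hkey'
  set S := PySem.List.sorted (PySem.List.pyRange 0 N 1) key' true with hSdef
  have hstrict : S.Pairwise (fun a b => key' b < key' a) := pv_sorted_strict keyA N
  have hperm : S.Perm (PySem.List.pyRange 0 N 1) := PySem.List.sorted_perm _ _ _
  have hndS : S.Nodup := hperm.nodup_iff.mpr (PySem.List.nodup_pyRange_one 0 N)
  have hmemS : ∀ x ∈ S, 0 ≤ x ∧ x < N := by
    intro x hx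
    have hx2 := hperm.mem_iff.mp hx
    rwa [PySem.List.mem_pyRange_one] at hx2
  rw [PySem.List.slice_to _ hk0]
  set sel := S.take k.toNat with hsel
  have hndsel : sel.Nodup := List.Nodup.sublist (List.take_sublist _ _) hndS
  have hbndsel : ∀ i ∈ sel, 0 ≤ i ∧ i < (base.length : Int) := by
    intro i hi
    have h3 := hmemS i (List.mem_of_mem_take hi)
    rw [hblen]
    exact h3
  obtain ⟨hAlen, hAval⟩ := pv_foldl_inc sel base hndsel hbndsel
  have hkeys : List.map (fun p : Int × Int => PySem.Int.mod (s * p.2) SS * p.2 * N - p.1)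
        (PySem.List.enumerate ratios)
      = (PySem.List.pyRange 0 N 1).map key' := by
    rw [PySem.List.enumerate_eq_map_pyRange ratios 0, List.map_map]
    have hlenN : PySem.List.len ratios = N := by simp [PySem.List.len, hN]
    rw [hlenN]
    apply List.map_congr_left
    intro j hj
    rw [PySem.List.mem_pyRange_one] at hj
    have hjN : j < (ratios.length : Int) := by rw [← hN]; exact hj.2
    have hjr : PySem.List.pyGetD ratios j 0 = ratios[j.toNat]'(by omega) :=
      PySem.List.pyGetD_eq_getElem ratios 0 hj.1 hjN
    have hjres : PySem.List.pyGetD res j 0 = PySem.Int.mod (s * ratios[j.toNat]'(by omega)) SS := by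
      rw [PySem.List.pyGetD_eq_getElem res 0 hj.1 (by rw [hrlen]; exact hjN)]
      simp only [hres, List.getElem_map]
    simp only [Function.comp, hkey', hkeyA, hjr, hjres]
  rw [hkeys]
  have hklen : ((PySem.List.pyRange 0 N 1).map key').length = ratios.length := by
    rw [List.length_map, PySem.List.length_pyRange_one]
    omega
  have hzlen : ((base.zip ((PySem.List.pyRange 0 N 1).map key')).map
      (fun p => p.1 + if ((((PySem.List.pyRange 0 N 1).map key').countP (fun kj => decide (p.2 < kj)) : Nat) : Int) < k then 1 else 0)).length = ratios.length := by
    rw [List.length_map, List.length_zip, hblen, hklen]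
    omega
  apply List.ext_getElem (by rw [hAlen, hblen, hzlen])
  intro m hm1 hm2
  have hmlt : m < ratios.length := by rw [hAlen, hblen] at hm1; exact hm1
  have hmbase : m < base.length := by omega
  -- left side via getD
  have hL : (sel.foldl (fun t i => PySem.List.pySetD t i (PySem.List.pyGetD t i 0 + 1)) base)[m]'hm1
      = base[m]'hmbase + (if ((m : Int) ∈ sel) then 1 else 0) := by
    rw [← List.getD_eq_getElem _ 0 hm1, hAval m hmbase, List.getD_eq_getElem _ 0 hmbase]
  rw [hL]
  simp only [List.getElem_map, List.getElem_zip]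
  have hrangeM : m < (PySem.List.pyRange 0 N 1).length := by
    rw [PySem.List.length_pyRange_one]; omega
  simp only [PySem.List.getElem_pyRange_one, zero_add]
  have hcnt : ((PySem.List.pyRange 0 N 1).map key').countP (fun kj => decide (key' (m : Int) < kj))
      = S.countP (fun j => decide (key' (m : Int) < key' j)) := by
    rw [List.countP_map]
    exact (hperm.countP_eq _).symm
  have hmS : (m : Int) ∈ S := by
    rw [hperm.mem_iff, PySem.List.mem_pyRange_one]
    constructor
    · omega
    · rw [hN]; exact_mod_cast hmlt
  have hiff := pv_mem_take_iff key' S hstrict (m : Int) hmS k.toNat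
  rw [hcnt]
  by_cases hmem : (m : Int) ∈ sel
  · have hlt := hiff.mp hmem
    rw [if_pos hmem, if_pos (by omega)]
  · have hge : ¬ S.countP (fun j => decide (key' (m : Int) < key' j)) < k.toNat := fun h => hmem (hiff.mpr h)
    rw [if_neg hmem, if_neg (by omega)]
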